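-- pv_equiv track=rewrite | github.com/kiriappeee/advent-of-code-2017 | python/day2solution.py | find_evenly_divisible_values
-- ===== SOURCE A (Python) =====
-- def find_evenly_divisible_values(spreadsheet_row):
--     sorted_row = spreadsheet_row.copy()
--     sorted_row.sort()
--     max_value_index = len(sorted_row) - 1
--     while max_value_index>0:
--         min_value_index = 0
--         while min_value_index < max_value_index:
--             if sorted_row[max_value_index] % sorted_row[min_value_index] == 0:
--                 return (sorted_row[max_value_index], sorted_row[min_value_index])
--             min_value_index += 1
--         max_value_index -= 1
-- ===== SOURCE B (Python) =====
-- def find_evenly_divisible_values(spreadsheet_row):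
--     candidates = [(max(x, y), min(x, y))
--                   for i, x in enumerate(spreadsheet_row)
--                   for y in spreadsheet_row[i + 1:]
--                   if min(x, y) != 0 and max(x, y) % min(x, y) == 0]
--     return max(candidates, key=lambda p: (p[0], -p[1]), default=None)
-- ===== Notes on version B (the rewrite author's own statement) =====
-- stated objective: simpler
-- what changed: B replaces A's copy-sort plus indexed nested while-loops with early return by collecting, from the unsorted row, all unordered pairs normalised to (larger, smaller) that divide evenly (skipping zero divisors), and selecting the result with max(key=(dividend, -divisor), default=None).
import Mathlib
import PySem

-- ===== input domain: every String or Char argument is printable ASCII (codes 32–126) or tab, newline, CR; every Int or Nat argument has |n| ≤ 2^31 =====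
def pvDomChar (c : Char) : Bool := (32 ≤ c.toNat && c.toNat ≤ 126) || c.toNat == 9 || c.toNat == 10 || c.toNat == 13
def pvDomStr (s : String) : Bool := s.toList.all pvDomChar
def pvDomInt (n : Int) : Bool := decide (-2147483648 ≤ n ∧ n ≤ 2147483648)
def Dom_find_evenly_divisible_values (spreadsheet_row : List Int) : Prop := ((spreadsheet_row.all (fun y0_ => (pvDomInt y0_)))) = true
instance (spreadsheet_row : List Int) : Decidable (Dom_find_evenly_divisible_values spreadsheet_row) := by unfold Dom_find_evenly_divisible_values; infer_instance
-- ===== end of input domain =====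

-- B replaces A's copy-sort + indexed nested while-loops (early return) by collecting all
-- divisible (larger, smaller) pairs of the unsorted row (skipping zero divisors) and picking
-- the max by (dividend, -divisor). Objective: simpler; B examines all pairs, so not faster.
-- Pre_ excludes exactly the rows on which Python A raises ZeroDivisionError.


-- ===== PORT A =====
-- inner 'while min_value_index < max_value_index' loop of A
def fedvInner (s : List Int) (maxI minI : Int) : Option (Int × Int) :=
  if _h : minI < maxI then
    if PySem.Int.mod (PySem.List.pyGetD s maxI 0) (PySem.List.pyGetD s minI 0) = 0 then
      some (PySem.List.pyGetD s maxI 0, PySem.List.pyGetD s minI 0)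
    else fedvInner s maxI (minI + 1)
  else none
termination_by (maxI - minI).toNat
decreasing_by omega

-- outer 'while max_value_index > 0' loop of A
def fedvOuter (s : List Int) (maxI : Int) : Option (Int × Int) :=
  if _h : maxI > 0 then
    match fedvInner s maxI 0 with
    | some r => some r
    | none => fedvOuter s (maxI - 1)
  else none
termination_by maxI.toNat
decreasing_by omega

def find_evenly_divisible_values (spreadsheet_row : List Int) : Option (Int × Int) :=
  let sorted_row := PySem.List.sorted spreadsheet_row (fun x => x) false
  fedvOuter sorted_row ((sorted_row.length : Int) - 1)

-- ===== PORT B =====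
-- the 'candidates' comprehension of Source B (enumerate + slice, skipping zero divisors),
-- then max(..., key, default=None)
def find_evenly_divisible_values_alt (spreadsheet_row : List Int) : Option (Int × Int) :=
  let candidates := (PySem.List.enumerate spreadsheet_row).flatMap (fun ix =>
    ((PySem.List.slice spreadsheet_row (some (ix.1 + 1))).filter
        (fun y => (min ix.2 y != 0) && (PySem.Int.mod (max ix.2 y) (min ix.2 y) == 0))).map
      (fun y => (max ix.2 y, min ix.2 y)))
  PySem.List.max2? candidates (fun p => p.1) (fun p => -p.2)

-- ===== PRECONDITION & SPEC =====
-- Pre_ excludes exactly the inputs on which Python A raises ZeroDivisionError: rows of length ≥ 2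
-- containing 0 whose maximum has no negative divisor in the row (A's sorted scan then uses 0 as a
-- divisor before returning). On every other row A returns normally.
def Pre_find_evenly_divisible_values (spreadsheet_row : List Int) : Prop :=
  (0 : Int) ∉ spreadsheet_row ∨ spreadsheet_row.length ≤ 1 ∨
    ∃ m ∈ spreadsheet_row, (∀ x ∈ spreadsheet_row, x ≤ m) ∧
      ∃ n ∈ spreadsheet_row, n < 0 ∧ n ∣ m
instance (spreadsheet_row : List Int) : Decidable (Pre_find_evenly_divisible_values spreadsheet_row) := by
  unfold Pre_find_evenly_divisible_values; infer_instance

def pvWitness_find_evenly_divisible_values : List Int := [5, 9, 2, 8]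

def Spec_find_evenly_divisible_values (spreadsheet_row : List Int) (out : Option (Int × Int)) : Prop := out = find_evenly_divisible_values_alt spreadsheet_row
instance (spreadsheet_row : List Int) (out : Option (Int × Int)) : Decidable (Spec_find_evenly_divisible_values spreadsheet_row out) := by unfold Spec_find_evenly_divisible_values; infer_instance

-- ===== CLAIM (what is proved, stated in full; the proofs are below) =====
def Claim_equal_find_evenly_divisible_values : Prop := ∀ (spreadsheet_row : List Int), Dom_find_evenly_divisible_values spreadsheet_row → Pre_find_evenly_divisible_values spreadsheet_row → Spec_find_evenly_divisible_values spreadsheet_row (find_evenly_divisible_values spreadsheet_row)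


-- ===== LEMMAS AND PROOFS =====

-- recursive form of Source B's pair comprehension, used only by the proofs
def divisiblePairs (xs : List Int) : List (Int × Int) :=
  match xs with
  | [] => []
  | x :: rest =>
      ((rest.filter (fun y => (min x y != 0) && (PySem.Int.mod (max x y) (min x y) == 0))).map
        (fun y => (max x y, min x y))) ++ divisiblePairs rest

-- "key p < key q" for the key (p.1, -p.2), exactly the comparison max2? performs
def ltKb (p q : Int × Int) : Bool :=
  decide (p.1 < q.1) || (!decide (q.1 < p.1) && decide (-p.2 < -q.2))

theorem ltKb_trich (p q : Int × Int) : p = q ∨ ltKb p q = true ∨ ltKb q p = true := by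
  obtain ⟨a, b⟩ := p; obtain ⟨c, d⟩ := q
  simp [ltKb, Prod.ext_iff]; omega

theorem ltKb_asymm {p q : Int × Int} (h1 : ltKb p q = true) (h2 : ltKb q p = true) : False := by
  obtain ⟨a, b⟩ := p; obtain ⟨c, d⟩ := q
  simp [ltKb] at h1 h2; omega

def maxRun (m : Int × Int) (l : List (Int × Int)) : Int × Int :=
  l.foldl (fun m y => if ltKb m y then y else m) m

theorem ltKb_trans {p q r : Int × Int} (h1 : ltKb p q = true) (h2 : ltKb q r = true) :
    ltKb p r = true := by
  obtain ⟨a, b⟩ := p; obtain ⟨c, d⟩ := q; obtain ⟨e, f⟩ := r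
  simp [ltKb] at *; omega

theorem max2?_aux (l : List (Int × Int)) (m : Int × Int) :
    List.foldl (fun acc x => match acc with
      | none => some x
      | some mm =>
          if (decide (mm.1 < x.1) || (!decide (x.1 < mm.1) && decide (-mm.2 < -x.2))) = true
          then some x else some mm)
      (some m) l = some (maxRun m l) := by
  induction l generalizing m with
  | nil => simp [maxRun]
  | cons y l ih =>
      have hstep : maxRun m (y :: l) = maxRun (if ltKb m y then y else m) l := rfl
      rw [hstep, ← ih]
      simp only [List.foldl_cons, ltKb]
      split <;> rfl

theorem max2?_cons (x : Int × Int) (l : List (Int × Int)) :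
    PySem.List.max2? (x :: l) (fun p => p.1) (fun p => -p.2) = some (maxRun x l) := by
  show List.foldl _ (some x) l = _
  refine Eq.trans (PySem.List.foldl_congr_mem _ _ _ _ ?_) (max2?_aux l x)
  intro acc y _
  cases acc <;> rfl

def PairBest (l : List (Int × Int)) (m : Int × Int) : Prop :=
  m ∈ l ∧ ∀ y ∈ l, y = m ∨ ltKb y m = true

theorem maxRun_spec (l : List (Int × Int)) (m : Int × Int) :
    (maxRun m l = m ∨ maxRun m l ∈ l) ∧
      (∀ y, (y = m ∨ y ∈ l) → y = maxRun m l ∨ ltKb y (maxRun m l) = true) := by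
  induction l generalizing m with
  | nil =>
      refine ⟨Or.inl rfl, ?_⟩
      rintro y (rfl | hy)
      · exact Or.inl rfl
      · exact absurd hy (List.not_mem_nil)
  | cons x l ih =>
      have hstep : maxRun m (x :: l) = maxRun (if ltKb m x then x else m) l := rfl
      by_cases hmx : ltKb m x = true
      · rw [hstep, if_pos hmx]
        obtain ⟨ihmem, ihge⟩ := ih x
        refine ⟨?_, ?_⟩
        · rcases ihmem with h | h
          · exact Or.inr (by rw [h]; exact List.mem_cons_self)
          · exact Or.inr (List.mem_cons_of_mem _ h)
        · rintro y (rfl | hy)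
          · rcases ihge x (Or.inl rfl) with h | h
            · exact Or.inr (by rw [← h]; exact hmx)
            · exact Or.inr (ltKb_trans hmx h)
          · rcases List.mem_cons.mp hy with rfl | hy'
            · exact ihge y (Or.inl rfl)
            · exact ihge y (Or.inr hy')
      · rw [hstep, if_neg hmx]
        obtain ⟨ihmem, ihge⟩ := ih m
        refine ⟨?_, ?_⟩
        · rcases ihmem with h | h
          · exact Or.inl h
          · exact Or.inr (List.mem_cons_of_mem _ h)
        · rintro y (rfl | hy)
          · exact ihge y (Or.inl rfl)
          · rcases List.mem_cons.mp hy with rfl | hy'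
            · rcases ltKb_trich y m with rfl | h | h
              · exact ihge y (Or.inl rfl)
              · rcases ihge m (Or.inl rfl) with h2 | h2
                · exact Or.inr (by rw [← h2]; exact h)
                · exact Or.inr (ltKb_trans h h2)
              · exact absurd h hmx
            · exact ihge y (Or.inr hy')

theorem isMax_unique {l : List (Int × Int)} {m m' : Int × Int}
    (h : PairBest l m) (h' : PairBest l m') : m = m' := by
  rcases h'.2 m h.1 with h1 | h1
  · exact h1
  · rcases h.2 m' h'.1 with h2 | h2
    · exact h2.symm
    · exact absurd h1 (fun hh => ltKb_asymm hh h2)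

theorem max2?_some_isMax {l : List (Int × Int)} {m : Int × Int}
    (h : PySem.List.max2? l (fun p => p.1) (fun p => -p.2) = some m) : PairBest l m := by
  cases l with
  | nil => simp [PySem.List.max2?] at h
  | cons x t =>
      rw [max2?_cons] at h
      obtain rfl : maxRun x t = m := by injection h
      obtain ⟨hmem, hge⟩ := maxRun_spec t x
      refine ⟨?_, ?_⟩
      · rcases hmem with h | h
        · rw [h]; exact List.mem_cons_self
        · exact List.mem_cons_of_mem _ h
      · intro y hy
        rcases List.mem_cons.mp hy with rfl | hy'
        · exact hge y (Or.inl rfl)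
        · exact hge y (Or.inr hy')

theorem max2?_of_isMax {l : List (Int × Int)} {m : Int × Int} (h : PairBest l m) :
    PySem.List.max2? l (fun p => p.1) (fun p => -p.2) = some m := by
  cases l with
  | nil => exact absurd h.1 (List.not_mem_nil)
  | cons x t =>
      rw [max2?_cons]
      have hb : PairBest (x :: t) (maxRun x t) := max2?_some_isMax (max2?_cons x t)
      exact congrArg some (isMax_unique hb h)

theorem max2?_perm {l l' : List (Int × Int)} (h : l.Perm l') :
    PySem.List.max2? l (fun p => p.1) (fun p => -p.2)
      = PySem.List.max2? l' (fun p => p.1) (fun p => -p.2) := by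
  cases l with
  | nil => rw [h.nil_eq.symm]
  | cons x t =>
      have h1 := max2?_cons x t
      have hb : PairBest (x :: t) (maxRun x t) := max2?_some_isMax h1
      have hb' : PairBest l' (maxRun x t) :=
        ⟨h.mem_iff.mp hb.1, fun y hy => hb.2 y (h.mem_iff.mpr hy)⟩
      rw [h1, max2?_of_isMax hb']

theorem divisiblePairs_perm {l l' : List Int} (h : l.Perm l') :
    (divisiblePairs l).Perm (divisiblePairs l') := by
  induction h with
  | nil => exact List.Perm.refl _
  | cons x h ih =>
      simp only [divisiblePairs]
      exact ((h.filter _).map _).append ih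
  | swap x y l =>
      simp only [divisiblePairs, List.filter_cons, max_comm y x, min_comm y x]
      by_cases hc : ((min x y != 0) && (PySem.Int.mod (max x y) (min x y) == 0)) = true
      · simp only [if_pos hc, List.map_cons, List.cons_append]
        rw [max_comm y x, min_comm y x]
        exact List.Perm.cons _ (List.perm_append_comm_assoc _ _ _)
      · simp only [if_neg hc]
        exact List.perm_append_comm_assoc _ _ _
  | trans _ _ ih1 ih2 => exact ih1.trans ih2

theorem divisiblePairs_mem {l : List Int} {z : Int × Int} (h : z ∈ divisiblePairs l) :
    z.1 ∈ l ∧ z.2 ∈ l ∧ z.2 ≤ z.1 ∧ PySem.Int.mod z.1 z.2 = 0 := by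
  induction l with
  | nil => simp [divisiblePairs] at h
  | cons x rest ih =>
      simp only [divisiblePairs, List.mem_append] at h
      rcases h with h | h
      · obtain ⟨y, hy, rfl⟩ := List.mem_map.mp h
        obtain ⟨hyr, hcond⟩ := List.mem_filter.mp hy
        simp only [Bool.and_eq_true, beq_iff_eq] at hcond
        refine ⟨?_, ?_, min_le_max, hcond.2⟩
        · rcases max_choice x y with h1 | h1 <;> rw [h1]
          · exact List.mem_cons_self
          · exact List.mem_cons_of_mem _ hyr
        · rcases min_choice x y with h1 | h1 <;> rw [h1]
          · exact List.mem_cons_self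
          · exact List.mem_cons_of_mem _ hyr
      · obtain ⟨h1, h2, h3, h4⟩ := ih h
        exact ⟨List.mem_cons_of_mem _ h1, List.mem_cons_of_mem _ h2, h3, h4⟩

theorem find?_sorted_min {t : List Int} {p : Int → Bool} {y₀ : Int}
    (hs : t.Pairwise (· ≤ ·)) (h : t.find? p = some y₀) :
    ∀ y ∈ t, p y → y₀ ≤ y := by
  induction t with
  | nil => simp at h
  | cons a t ih =>
      obtain ⟨ha, ht⟩ := List.pairwise_cons.mp hs
      by_cases hpa : p a = true
      · rw [List.find?_cons_of_pos hpa] at h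
        obtain rfl : a = y₀ := by injection h
        intro y hy _
        rcases List.mem_cons.mp hy with rfl | hy'
        · exact le_refl _
        · exact ha y hy'
      · rw [List.find?_cons_of_neg hpa] at h
        intro y hy hpy
        rcases List.mem_cons.mp hy with rfl | hy'
        · exact absurd hpy hpa
        · exact ih ht h y hy' hpy

theorem inner_append (t : List Int) (x : Int) (j : Int) (h0 : 0 ≤ j) :
    fedvInner (t ++ [x]) (t.length : Int) j =
      ((t.drop j.toNat).find? (fun y => PySem.Int.mod x y == 0)).map (fun y => (x, y)) := by
  rw [fedvInner]
  by_cases hj : j < (t.length : Int)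
  · have hjn : j.toNat < t.length := by omega
    have hgx : PySem.List.pyGetD (t ++ [x]) (t.length : Int) 0 = x := by
      rw [PySem.List.pyGetD_eq_getElem (t ++ [x]) 0 (by omega) (by simp only [List.length_append, List.length_cons, List.length_nil]; push_cast; omega)]
      simp
    have hgj : PySem.List.pyGetD (t ++ [x]) j 0 = t[j.toNat] := by
      rw [PySem.List.pyGetD_eq_getElem (t ++ [x]) 0 h0 (by simp only [List.length_append, List.length_cons, List.length_nil]; push_cast; omega)]
      exact List.getElem_append_left _
    have hdrop : t.drop j.toNat = t[j.toNat] :: t.drop (j.toNat + 1) :=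
      List.drop_eq_getElem_cons hjn
    rw [dif_pos hj, hgx, hgj, hdrop, List.find?_cons]
    by_cases hmod : PySem.Int.mod x t[j.toNat] = 0
    · simp [hmod]
    · have hb : (PySem.Int.mod x t[j.toNat] == 0) = false := by simpa using hmod
      rw [if_neg hmod, hb]
      have heq : (j + 1).toNat = j.toNat + 1 := by omega
      rw [inner_append t x (j + 1) (by omega), heq]
  · rw [dif_neg hj]
    have : t.drop j.toNat = [] := List.drop_of_length_le (by omega)
    simp [this]
termination_by ((t.length : Int) - j).toNat
decreasing_by omega

theorem inner_prefix (t : List Int) (x : Int) (maxI minI : Int)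
    (hm : maxI < (t.length : Int)) (h0 : 0 ≤ minI) :
    fedvInner (t ++ [x]) maxI minI = fedvInner t maxI minI := by
  conv_lhs => rw [fedvInner]
  conv_rhs => rw [fedvInner]
  by_cases h : minI < maxI
  · have hga : PySem.List.pyGetD (t ++ [x]) maxI 0 = PySem.List.pyGetD t maxI 0 := by
      rw [PySem.List.pyGetD_eq_getElem (t ++ [x]) 0 (by omega) (by simp only [List.length_append, List.length_cons, List.length_nil]; push_cast; omega),
          PySem.List.pyGetD_eq_getElem t 0 (by omega) (by omega)]
      exact List.getElem_append_left _
    have hgb : PySem.List.pyGetD (t ++ [x]) minI 0 = PySem.List.pyGetD t minI 0 := by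
      rw [PySem.List.pyGetD_eq_getElem (t ++ [x]) 0 h0 (by simp only [List.length_append, List.length_cons, List.length_nil]; push_cast; omega),
          PySem.List.pyGetD_eq_getElem t 0 h0 (by omega)]
      exact List.getElem_append_left _
    rw [dif_pos h, dif_pos h, hga, hgb]
    by_cases hmod : PySem.Int.mod (PySem.List.pyGetD t maxI 0) (PySem.List.pyGetD t minI 0) = 0
    · rw [if_pos hmod, if_pos hmod]
    · rw [if_neg hmod, if_neg hmod]
      exact inner_prefix t x maxI (minI + 1) hm (by omega)
  · rw [dif_neg h, dif_neg h]
termination_by (maxI - minI).toNat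
decreasing_by omega

theorem outer_prefix (t : List Int) (x : Int) (maxI : Int) (hm : maxI < (t.length : Int)) :
    fedvOuter (t ++ [x]) maxI = fedvOuter t maxI := by
  conv_lhs => rw [fedvOuter]
  conv_rhs => rw [fedvOuter]
  by_cases h : maxI > 0
  · rw [dif_pos h, dif_pos h, inner_prefix t x maxI 0 hm (by omega)]
    cases fedvInner t maxI 0 with
    | some r => rfl
    | none => exact outer_prefix t x (maxI - 1) (by omega)
  · rw [dif_neg h, dif_neg h]
termination_by maxI.toNat
decreasing_by omega

theorem pre_perm {l l' : List Int} (h : l.Perm l') :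
    Pre_find_evenly_divisible_values l ↔ Pre_find_evenly_divisible_values l' := by
  unfold Pre_find_evenly_divisible_values
  simp only [h.mem_iff, h.length_eq]

theorem main_sorted (s : List Int) : s.Pairwise (· ≤ ·) →
    Pre_find_evenly_divisible_values s →
    fedvOuter s ((s.length : Int) - 1)
      = PySem.List.max2? (divisiblePairs s) (fun p => p.1) (fun p => -p.2) := by
  induction s using List.reverseRecOn with
  | nil =>
      intro _ _
      rw [fedvOuter]
      rfl
  | append_singleton t x ih =>
      intro hs hnr
      have hpt : t.Pairwise (· ≤ ·) := (List.pairwise_append.mp hs).1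
      have hxall : ∀ y ∈ t, y ≤ x := by
        intro y hy
        exact (List.pairwise_append.mp hs).2.2 y hy x (by simp)
      have hall : ∀ z ∈ t ++ [x], z ≤ x := by
        intro z hz
        rcases List.mem_append.mp hz with hz | hz
        · exact hxall z hz
        · rw [List.mem_singleton.mp hz]
      have hperm : (divisiblePairs (t ++ [x])).Perm (divisiblePairs (x :: t)) :=
        divisiblePairs_perm (List.perm_append_singleton x t)
      rw [max2?_perm hperm]
      have hlen : (((t ++ [x]).length : Int)) - 1 = (t.length : Int) := by simp
      rw [hlen, fedvOuter]
      by_cases ht0 : (t.length : Int) > 0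
      · rw [dif_pos ht0, inner_append t x 0 le_rfl]
        simp only [Int.toNat_zero, List.drop_zero]
        cases hfind : t.find? (fun y => PySem.Int.mod x y == 0) with
        | some y₀ =>
            simp only [Option.map_some]
            have hy₀t : y₀ ∈ t := List.mem_of_find?_eq_some hfind
            have hpy₀ : PySem.Int.mod x y₀ = 0 := by
              simpa using List.find?_some hfind
            have hmin : ∀ y ∈ t, PySem.Int.mod x y = 0 → y₀ ≤ y := by
              intro y hy hmy
              exact find?_sorted_min hpt hfind y hy (by simpa using hmy)
            -- the first divisor A finds is never 0 on a Pre_ row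
            have hy₀ne : y₀ ≠ 0 := by
              intro h0
              subst h0
              have hx0 : x = 0 := by
                have := (PySem.Int.mod_eq_zero_iff_dvd x 0).mp hpy₀
                simpa using this
              subst hx0
              rcases hnr with h | h | ⟨m, hm, hmax, n, hn, hneg, hdvd⟩
              · exact h (List.mem_append.mpr (Or.inl hy₀t))
              · have := List.length_pos_of_mem hy₀t
                simp only [List.length_append, List.length_cons, List.length_nil] at h
                omega
              · have hnt : n ∈ t := by
                  rcases List.mem_append.mp hn with h' | h'
                  · exact h'
                  · rw [List.mem_singleton.mp h'] at hneg; omega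
                have hpn : (PySem.Int.mod 0 n == 0) = true := by
                  simpa using (PySem.Int.mod_eq_zero_iff_dvd 0 n).mpr (dvd_zero n)
                have := find?_sorted_min hpt hfind n hnt hpn
                omega
            refine (max2?_of_isMax ?_).symm
            constructor
            · simp only [divisiblePairs, List.mem_append]
              left
              refine List.mem_map.mpr ⟨y₀, List.mem_filter.mpr ⟨hy₀t, ?_⟩, ?_⟩
              · rw [max_eq_left (hxall y₀ hy₀t), min_eq_right (hxall y₀ hy₀t)]
                simp [hy₀ne, hpy₀]
              · rw [max_eq_left (hxall y₀ hy₀t), min_eq_right (hxall y₀ hy₀t)]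
            · intro z hz
              simp only [divisiblePairs, List.mem_append] at hz
              rcases hz with hz | hz
              · obtain ⟨y, hyf, rfl⟩ := List.mem_map.mp hz
                obtain ⟨hyt, hyc⟩ := List.mem_filter.mp hyf
                rw [max_eq_left (hxall y hyt), min_eq_right (hxall y hyt)] at hyc ⊢
                simp only [Bool.and_eq_true, beq_iff_eq] at hyc
                have hy0y : y₀ ≤ y := hmin y hyt hyc.2
                by_cases hyy : y = y₀
                · exact Or.inl (by rw [hyy])
                · refine Or.inr ?_
                  simp only [ltKb]
                  simp
                  omega
              · obtain ⟨h1, h2, h3, h4⟩ := divisiblePairs_mem hz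
                have hz1 : z.1 ≤ x := hxall _ h1
                rcases lt_or_eq_of_le hz1 with hlt | heq
                · refine Or.inr ?_
                  simp only [ltKb]
                  simp
                  omega
                · have hy0z : y₀ ≤ z.2 := hmin z.2 h2 (by rw [← heq]; exact h4)
                  by_cases hzy : z.2 = y₀
                  · exact Or.inl (Prod.ext heq hzy)
                  · refine Or.inr ?_
                    simp only [ltKb]
                    simp
                    omega
        | none =>
            simp only [Option.map_none]
            have hnone : ∀ y ∈ t, ¬ (PySem.Int.mod x y = 0) := by
              intro y hy
              have := List.find?_eq_none.mp hfind y hy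
              simpa using this
            -- on a Pre_ row, if no element of t divides the maximum x, then 0 ∉ t
            have h0t : (0 : Int) ∉ t := by
              intro h0t
              have hx0 : x ≠ 0 := by
                intro hx
                subst hx
                exact hnone 0 h0t ((PySem.Int.mod_eq_zero_iff_dvd 0 0).mpr (dvd_zero 0))
              rcases hnr with h | h | ⟨m, hm, hmax, n, hn, hneg, hdvd⟩
              · exact h (List.mem_append.mpr (Or.inl h0t))
              · have := List.length_pos_of_mem h0t
                simp only [List.length_append, List.length_cons, List.length_nil] at h
                omega
              · have hmx : m = x :=
                  le_antisymm (hall m hm) (hmax x (List.mem_append.mpr (Or.inr List.mem_cons_self)))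
                have hnt : n ∈ t := by
                  rcases List.mem_append.mp hn with h' | h'
                  · exact h'
                  · have := List.mem_singleton.mp h'
                    have hx0' : 0 ≤ x := hxall 0 h0t
                    omega
                refine hnone n hnt ?_
                exact (PySem.Int.mod_eq_zero_iff_dvd x n).mpr (hmx ▸ hdvd)
            rw [outer_prefix t x _ (by omega), ih hpt (Or.inl h0t)]
            have hfil : t.filter (fun y => (min x y != 0) && (PySem.Int.mod (max x y) (min x y) == 0)) = [] := by
              rw [List.filter_eq_nil_iff]
              intro y hy
              rw [max_eq_left (hxall y hy), min_eq_right (hxall y hy)]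
              simp [hnone y hy]
            simp only [divisiblePairs, hfil, List.map_nil, List.nil_append]
      · have ht : t = [] := by
          cases t with
          | nil => rfl
          | cons a b => simp at ht0
        subst ht
        rw [dif_neg ht0]
        rfl

theorem enumSliceAux (rest : List Int) : ∀ (k : Nat) (row : List Int), row.drop k = rest →
    (PySem.List.enumerate rest (k : Int)).flatMap (fun ix =>
      ((PySem.List.slice row (some (ix.1 + 1))).filter
          (fun y => (min ix.2 y != 0) && (PySem.Int.mod (max ix.2 y) (min ix.2 y) == 0))).map
        (fun y => (max ix.2 y, min ix.2 y))) = divisiblePairs rest := by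
  induction rest with
  | nil =>
      intro k row h
      simp [PySem.List.enumerate_nil, divisiblePairs]
  | cons x rest ih =>
      intro k row h
      rw [PySem.List.enumerate_cons, List.flatMap_cons]
      have hdrop : row.drop (k + 1) = rest := by
        have h1 : (row.drop k).drop 1 = row.drop (k + 1) := by
          rw [List.drop_drop]
        rw [← h1, h]
        rfl
      have hs : PySem.List.slice row (some ((k : Int) + 1)) = rest := by
        rw [PySem.List.slice_from row (by omega)]
        have h2 : ((k : Int) + 1).toNat = k + 1 := by omega
        rw [h2, hdrop]
      show ((PySem.List.slice row (some ((k:Int) + 1))).filter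
          (fun y => (min x y != 0) && (PySem.Int.mod (max x y) (min x y) == 0))).map
        (fun y => (max x y, min x y)) ++ _ = _
      rw [hs]
      have h3 : ((k : Int) + 1) = ((k + 1 : Nat) : Int) := by push_cast; ring
      rw [h3, ih (k + 1) row hdrop]
      rfl

theorem alt_eq_divisiblePairs (row : List Int) :
    find_evenly_divisible_values_alt row
      = PySem.List.max2? (divisiblePairs row) (fun p => p.1) (fun p => -p.2) := by
  unfold find_evenly_divisible_values_alt
  show PySem.List.max2? _ _ _ = _
  congr 1
  simpa using enumSliceAux row 0 row List.drop_zero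

-- ===== VERDICT (by name: the statement is the Claim_ definition above) =====
theorem find_evenly_divisible_values_spec : Claim_equal_find_evenly_divisible_values := by
  intro row _ hpre
  unfold Spec_find_evenly_divisible_values find_evenly_divisible_values
  rw [alt_eq_divisiblePairs]
  have hpw : (PySem.List.sorted row (fun x => x) false).Pairwise (· ≤ ·) :=
    PySem.List.sorted_pairwise row (fun x => x)
  have hperm := PySem.List.sorted_perm row (fun x => x) false
  rw [main_sorted _ hpw ((pre_perm hperm).mpr hpre)]
  exact max2?_perm (divisiblePairs_perm hperm)
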